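-- pv_equiv track=rewrite | github.com/dadadel/pyment | pyment/docstrings/generators/numpydoc_generator.py | _remove_signature_comment
-- ===== SOURCE A (Python) =====
-- def _remove_signature_comment(txt: str) -> str:
--     """If there is a comment at the end of the signature statement, remove it.
--
--     Parameters
--     ----------
--     txt : str
--         Signature line
--
--     Returns
--     -------
--     str
--         Cleaned signature line
--     """
--     ret = ""
--     # This should be a list like in _extract_signature_elements
--     # Otherwise in a situation like (((() the one closing parenthesis would
--     # break us out of everything
--     inside = None
--     end_inside = {"(": ")", "{": "}", "[": "]", "'": "'", '"': '"'}
--     for char in txt: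
--         if (inside and end_inside[inside] != char) or (
--             not inside and char in end_inside
--         ):
--             if not inside:
--                 inside = char
--             ret += char
--             continue
--         if inside and char == end_inside[inside]:
--             inside = None
--             ret += char
--             continue
--         if not inside and char == "#":
--             # found a comment so signature is finished we stop parsing
--             break
--         ret += char
--     return ret
-- ===== SOURCE B (Python) =====
-- def _remove_signature_comment(txt: str) -> str:
--     """Chunk-and-jump scanner: jump over whole delimited segments instead of a per-char state machine."""
--     end_inside = {"(": ")", "{": "}", "[": "]", "'": "'", '"': '"'}
--     out = []
--     i = 0
--     n = len(txt)
--     while i < n: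
--         c = txt[i]
--         if c in end_inside:
--             j = txt.find(end_inside[c], i + 1)
--             if j == -1:
--                 out.append(txt[i:])
--                 break
--             out.append(txt[i:j + 1])
--             i = j + 1
--         elif c == "#":
--             break
--         else:
--             out.append(c)
--             i += 1
--     return "".join(out)
-- ===== Notes on version B (the rewrite author's own statement) =====
-- stated objective: alternative
-- what changed: Replaced the per-character inside-state machine with a chunk-and-jump scanner that, on an opening delimiter or quote, uses str.find to locate the matching closer and copies the whole delimited slice at once (copying the remainder if unterminated), stopping at the comment character outside any region.
import Mathlib
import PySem

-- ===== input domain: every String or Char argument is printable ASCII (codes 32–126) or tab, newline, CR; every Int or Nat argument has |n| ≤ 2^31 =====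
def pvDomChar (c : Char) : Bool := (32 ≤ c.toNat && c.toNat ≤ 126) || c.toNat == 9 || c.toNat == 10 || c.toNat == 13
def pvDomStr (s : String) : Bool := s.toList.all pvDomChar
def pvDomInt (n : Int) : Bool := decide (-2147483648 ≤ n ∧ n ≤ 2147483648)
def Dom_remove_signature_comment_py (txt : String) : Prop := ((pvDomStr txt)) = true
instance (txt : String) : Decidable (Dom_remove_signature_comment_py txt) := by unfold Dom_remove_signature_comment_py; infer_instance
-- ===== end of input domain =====

-- B replaces A's per-character `inside` state machine by an index-free chunk-and-jump scanner that
-- copies a whole delimited segment at once (via a find-the-closer split); same return value, no speed claim.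

-- the end_inside map of both Pythons, as a membership test and a close-delimiter function
def pvIsOpen (c : Char) : Bool := c == '(' || c == '{' || c == '[' || c == '\'' || c == '"'
def pvClose (c : Char) : Char :=
  if c = '(' then ')' else if c = '{' then '}' else if c = '[' then ']' else c

-- ===== PORT A =====
-- hand port (exact): Python iterates the characters of `txt`; we recurse over txt.toList with the
-- same state (ret, inside); `break` returns ret, branches in A's order.
def pvGoA (ret : List Char) (inside : Option Char) : List Char → List Char
  | [] => ret
  | c :: rest =>
    if (match inside with | some o => pvClose o != c | none => false)
        || (inside.isNone && pvIsOpen c) then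
      pvGoA (ret ++ [c]) (match inside with | none => some c | some o => some o) rest
    else if (match inside with | some o => c == pvClose o | none => false) then
      pvGoA (ret ++ [c]) none rest
    else if inside.isNone && c == '#' then ret
    else pvGoA (ret ++ [c]) inside rest

def remove_signature_comment_py (txt : String) : String :=
  String.ofList (pvGoA [] none txt.toList)

-- ===== PORT B =====
-- hand port (exact): Source B's `txt.find(end_inside[c], i+1)` on the suffix after the opener is the
-- first split of that suffix at the closer: some (before, after) iff find ≠ -1, where
-- txt[i+1:j] = before and txt[j+1:] = after.
def pvSplit1 (t : Char) : List Char → Option (List Char × List Char)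
  | [] => none
  | c :: r =>
    if c = t then some ([], r)
    else match pvSplit1 t r with
      | some (p, q) => some (c :: p, q)
      | none => none

theorem pvSplit1_length {t : Char} : ∀ {l p q : List Char},
    pvSplit1 t l = some (p, q) → q.length < l.length := by
  intro l
  induction l with
  | nil => intro p q h; simp [pvSplit1] at h
  | cons c r ih =>
    intro p q h
    simp only [pvSplit1] at h
    split at h
    · cases h; simp
    · cases hr : pvSplit1 t r with
      | none => rw [hr] at h; simp at h
      | some pq =>
        rw [hr] at h
        cases pq with
        | mk p' q' =>
          simp at h
          obtain ⟨_, hq⟩ := h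
          subst hq
          exact Nat.lt_succ_of_lt (ih hr)

-- Source B's while loop over index i, recursing on the remaining suffix; `out` accumulates the chunks.
def pvGoB (out : List Char) : List Char → List Char
  | [] => out
  | c :: rest =>
    if pvIsOpen c then
      match h : pvSplit1 (pvClose c) rest with
      | some (p, q) => pvGoB (out ++ c :: (p ++ [pvClose c])) q
      | none => out ++ c :: rest
    else if c == '#' then out
    else pvGoB (out ++ [c]) rest
  termination_by l => l.length
  decreasing_by
    · exact Nat.lt_succ_of_lt (pvSplit1_length h)
    · simp

def remove_signature_comment_py_alt (txt : String) : String :=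
  String.ofList (pvGoB [] txt.toList)

-- ===== PRECONDITION & SPEC =====
def Spec_remove_signature_comment_py (txt : String) (out : String) : Prop := out = remove_signature_comment_py_alt txt
instance (txt : String) (out : String) : Decidable (Spec_remove_signature_comment_py txt out) := by unfold Spec_remove_signature_comment_py; infer_instance

-- ===== CLAIM (what is proved, stated in full; the proofs are below) =====
def Claim_equal_remove_signature_comment_py : Prop := ∀ (txt : String), Dom_remove_signature_comment_py txt → Spec_remove_signature_comment_py txt (remove_signature_comment_py txt)

-- ===== LEMMAS AND PROOFS =====

theorem pvGoA_append : ∀ (l : List Char) (ret : List Char) (inside : Option Char),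
    pvGoA ret inside l = ret ++ pvGoA [] inside l := by
  intro l
  induction l with
  | nil => intro ret inside; simp [pvGoA]
  | cons c rest ih =>
    intro ret inside
    cases inside with
    | none =>
      simp only [pvGoA, List.nil_append, Option.isNone_none, Bool.true_and, Bool.false_or]
      split_ifs
      all_goals first
        | (rw [ih (ret ++ [c]), ih [c]]; simp)
        | simp
    | some o =>
      simp only [pvGoA, List.nil_append, Option.isNone_some, Bool.false_and, Bool.or_false,
        if_false, Bool.false_eq_true]
      split_ifs
      all_goals rw [ih (ret ++ [c]), ih [c]]
      all_goals simp

-- While inside opener o, A copies everything up to and including the first closer (or the rest).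
theorem pvGoA_inside (o : Char) : ∀ (l : List Char),
    pvGoA [] (some o) l =
      match pvSplit1 (pvClose o) l with
      | some (p, q) => p ++ pvClose o :: pvGoA [] none q
      | none => l := by
  intro l
  induction l with
  | nil => simp [pvGoA, pvSplit1]
  | cons c rest ih =>
    by_cases hc : c = pvClose o
    · subst hc
      simp [pvGoA, pvSplit1, pvGoA_append rest [pvClose o] none]
    · have hne : (pvClose o != c) = true := by
        simp only [bne_iff_ne]; exact Ne.symm hc
      simp only [pvGoA, pvSplit1, List.nil_append, hne, Bool.true_or, if_true]
      rw [pvGoA_append rest [c] (some o), ih]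
      rw [if_neg hc]
      cases hr : pvSplit1 (pvClose o) rest with
      | none => simp
      | some pq => cases pq; simp

-- plain unfolding lemma for the well-founded pvGoB (its equation carries a `match h :` binder)
theorem pvGoB_cons (out : List Char) (c : Char) (rest : List Char) :
    pvGoB out (c :: rest) =
      if pvIsOpen c then
        match pvSplit1 (pvClose c) rest with
        | some (p, q) => pvGoB (out ++ c :: (p ++ [pvClose c])) q
        | none => out ++ c :: rest
      else if c == '#' then out
      else pvGoB (out ++ [c]) rest := by
  simp only [pvGoB]
  split
  · split <;> rename_i heq <;> rw [heq]
  · rfl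

theorem pvGoB_append : ∀ (n : ℕ) (l : List Char), l.length ≤ n → ∀ (out : List Char),
    pvGoB out l = out ++ pvGoB [] l := by
  intro n
  induction n with
  | zero =>
    intro l hl out
    have : l = [] := List.eq_nil_of_length_eq_zero (Nat.le_zero.mp hl)
    subst this; simp [pvGoB]
  | succ n ih =>
    intro l hl out
    cases l with
    | nil => simp [pvGoB]
    | cons c rest =>
      simp only [List.length_cons, Nat.succ_le_succ_iff] at hl
      rw [pvGoB_cons out, pvGoB_cons []]
      by_cases hop : pvIsOpen c = true
      · simp only [if_pos hop]
        cases hr : pvSplit1 (pvClose c) rest with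
        | none => simp
        | some pq =>
          cases pq with
          | mk p q =>
            have hq : q.length ≤ n := le_trans (Nat.le_of_lt (pvSplit1_length hr)) hl
            show pvGoB (out ++ c :: (p ++ [pvClose c])) q =
              out ++ pvGoB ([] ++ c :: (p ++ [pvClose c])) q
            rw [ih q hq (out ++ c :: (p ++ [pvClose c])), ih q hq ([] ++ c :: (p ++ [pvClose c]))]
            simp
      · simp only [if_neg hop]
        by_cases hsh : (c == '#') = true
        · simp [hsh]
        · simp only [if_neg hsh]
          rw [ih rest hl (out ++ [c]), ih rest hl ([] ++ [c])]
          simp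

theorem pvGo_eq : ∀ (n : ℕ) (l : List Char), l.length ≤ n →
    pvGoA [] none l = pvGoB [] l := by
  intro n
  induction n with
  | zero =>
    intro l hl
    have : l = [] := List.eq_nil_of_length_eq_zero (Nat.le_zero.mp hl)
    subst this; simp [pvGoA, pvGoB]
  | succ n ih =>
    intro l hl
    cases l with
    | nil => simp [pvGoA, pvGoB]
    | cons c rest =>
      simp only [List.length_cons, Nat.succ_le_succ_iff] at hl
      rw [pvGoB_cons []]
      by_cases hop : pvIsOpen c = true
      · simp only [pvGoA, List.nil_append, Option.isNone_none, Bool.true_and, Bool.false_or,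
          if_pos hop]
        rw [pvGoA_append rest [c] (some c), pvGoA_inside c rest]
        cases hr : pvSplit1 (pvClose c) rest with
        | none => simp
        | some pq =>
          cases pq with
          | mk p q =>
            have hq : q.length ≤ n := le_trans (Nat.le_of_lt (pvSplit1_length hr)) hl
            show [c] ++ (p ++ pvClose c :: pvGoA [] none q) =
              pvGoB ([] ++ c :: (p ++ [pvClose c])) q
            rw [pvGoB_append n q hq ([] ++ c :: (p ++ [pvClose c])), ih q hq]
            simp
      · by_cases hsh : c = '#'
        · subst hsh
          simp [pvGoA, pvIsOpen]
        · simp only [pvGoA, List.nil_append, Option.isNone_none, Bool.true_and, Bool.false_or,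
            if_neg hop]
          rw [if_neg (show ¬(c == '#') = true by simp [hsh])]
          rw [if_neg (show ¬(c == '#') = true by simp [hsh])]
          rw [pvGoA_append rest [c] none, pvGoB_append n rest hl [c]]
          simp [ih rest hl]

-- ===== VERDICT (by name: the statement is the Claim_ definition above) =====
theorem remove_signature_comment_py_spec : Claim_equal_remove_signature_comment_py := by
  intro txt _
  show _ = _
  unfold remove_signature_comment_py remove_signature_comment_py_alt
  rw [pvGo_eq txt.toList.length txt.toList (le_refl _)]
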